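-- pv_equiv track=rewrite | github.com/981377660LMT/algorithm-study | 21_位运算/按位异或/2411改版. 按位异或最大的最小子数组长度.py | smallestSubarrays2
-- ===== SOURCE A (Python) =====
-- from typing import List
--
-- def smallestSubarrays2(nums: List[int]) -> List[int]:
--     """暴力对拍"""
--     n = len(nums)
--     res = [1] * n
--     for i in range(n):
--         xor_, curMax, curLen = 0, 0, 0
--         for j in range(i, n):
--             xor_ ^= nums[j]
--             if xor_ > curMax:
--                 curMax = xor_
--                 curLen = j - i + 1
--                 res[i] = curLen
--     return res
-- ===== SOURCE B (Python) =====
-- from typing import List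
--
-- # Prefix-XOR + binary trie over the suffix of prefix xors, storing the minimum
-- # prefix index at every node; per start i one greedy max-signed-XOR trie query
-- # replaces A's inner scan over all ends.  O(n*34) instead of O(n^2).
-- # Values |x| <= 2^31 fit in 34-bit two's complement, so each value is encoded
-- # as x & MASK; signed order of xors is unsigned order after flipping the sign
-- # bit, which the greedy descent realises via the mask SIGN.
--
-- _BITS = 34
-- _SIGN = 1 << (_BITS - 1)
-- _MASK = (1 << _BITS) - 1
--
--
-- def _ins(node, u, idx, k):
--     # node is None or [child0, child1, min_index]; returns the updated node,
--     # with k low bits of u still to be consumed.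
--     if node is None:
--         node = [None, None, idx]
--     else:
--         node = [node[0], node[1], min(node[2], idx)]
--     if k:
--         b = (u >> (k - 1)) & 1
--         node[b] = _ins(node[b], u, idx, k - 1)
--     return node
--
--
-- def _qry(node, u, mask, k, acc):
--     # maximise (v ^ mask) over v = u ^ u' for inserted u'; returns
--     # (best v, min index among inserted u' attaining it).
--     if k == 0:
--         return acc, node[2]
--     b = k - 1
--     ub = (u >> b) & 1
--     want = 1 - (ub ^ ((mask >> b) & 1))
--     child = node[want]
--     if child is None:
--         want = 1 - want
--         child = node[want]
--     return _qry(child, u, mask, b, acc + ((want ^ ub) << b))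
--
--
-- def smallestSubarrays2(nums: List[int]) -> List[int]:
--     n = len(nums)
--     p = [0]
--     for x in nums:
--         p.append(p[-1] ^ x)
--     res = [1] * n
--     root = None
--     for i in reversed(range(n)):
--         root = _ins(root, p[i + 1] & _MASK, i + 1, _BITS)
--         v, j = _qry(root, p[i] & _MASK, _SIGN, _BITS, 0)
--         best = v - (1 << _BITS) if v >> (_BITS - 1) else v
--         if best > 0:
--             res[i] = j - i
--     return res
-- ===== Notes on version B (the rewrite author's own statement) =====
-- stated objective: faster
-- what changed: A scans every end j for every start i, recomputing window xors; B computes prefix xors once and sweeps right-to-left maintaining a binary trie (34-bit two's-complement encoding) of the suffix prefix-xors with a min-index at each node, answering each start with one greedy max-signed-XOR trie query.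
import Mathlib
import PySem

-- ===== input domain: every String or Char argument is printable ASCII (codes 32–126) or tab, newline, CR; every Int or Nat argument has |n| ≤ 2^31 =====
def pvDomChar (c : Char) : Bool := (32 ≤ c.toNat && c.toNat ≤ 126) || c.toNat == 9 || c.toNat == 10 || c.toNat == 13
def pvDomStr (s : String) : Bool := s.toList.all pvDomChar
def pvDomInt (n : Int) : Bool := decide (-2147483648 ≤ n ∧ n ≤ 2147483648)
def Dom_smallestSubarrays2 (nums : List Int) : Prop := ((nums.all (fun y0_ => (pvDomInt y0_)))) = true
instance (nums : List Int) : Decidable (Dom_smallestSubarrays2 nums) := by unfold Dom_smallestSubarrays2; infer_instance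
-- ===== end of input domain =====

-- B replaces A's quadratic double scan by prefix xors plus a binary trie (34-bit
-- two's-complement encoding) over the suffix of prefix xors storing a min index,
-- answering each start with one greedy max-signed-XOR query (objective: faster).

-- ===== PORT A =====
def smallestSubarrays2 (nums : List Int) : List Int :=
  (PySem.List.pyRange 0 (nums.length : Int) 1).foldl
    (fun res i =>
      ((PySem.List.pyRange i (nums.length : Int) 1).foldl
        (fun (s : Int × Int × Int × List Int) j =>
          let xor_ := PySem.Int.bxor s.1 (PySem.List.pyGetD nums j 0)
          if xor_ > s.2.1 then
            (xor_, xor_, j - i + 1, s.2.2.2.set i.toNat (j - i + 1))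
          else
            (xor_, s.2.1, s.2.2.1, s.2.2.2))
        (0, 0, 0, res)).2.2.2)
    (List.replicate nums.length (1 : Int))

-- ===== PORT B =====
-- binary trie node: two children (nil = Python None) and the minimal index
inductive PvTrie : Type
  | nil : PvTrie
  | node : PvTrie → PvTrie → Int → PvTrie

-- _ins: descend along the k low bits of u, updating the min index (structural on k)
def pvIns : Nat → PvTrie → Nat → Int → PvTrie
  | 0, t, _, idx =>
    match t with
    | .nil => .node .nil .nil idx
    | .node l r m => .node l r (min m idx)
  | k+1, t, u, idx =>
    match t with
    | .nil =>
      if (u >>> k) &&& 1 == 1 then .node .nil (pvIns k .nil u idx) idx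
      else .node (pvIns k .nil u idx) .nil idx
    | .node l r m =>
      if (u >>> k) &&& 1 == 1 then .node l (pvIns k r u idx) (min m idx)
      else .node (pvIns k l u idx) r (min m idx)

-- _qry: greedy descent maximising (v ^ mask); `.nil` fallback is unreachable on a
-- trie holding at least one entry (the match mirrors Python's `if child is None`)
def pvQry : Nat → PvTrie → Nat → Nat → Nat → Nat × Int
  | 0, t, _, _, acc => (acc, match t with | .nil => 0 | .node _ _ m => m)
  | k+1, t, u, mask, acc =>
    match t with
    | .nil => (acc, 0)
    | .node l r _ =>
      let ub := (u >>> k) &&& 1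
      let want := 1 - (ub ^^^ ((mask >>> k) &&& 1))
      match (if want == 1 then r else l) with
      | .nil => pvQry k (if want == 1 then l else r) u mask (acc + (((1 - want) ^^^ ub) <<< k))
      | .node l' r' m' => pvQry k (.node l' r' m') u mask (acc + ((want ^^^ ub) <<< k))

-- p & _MASK (all-ones mask = mod 2^34, exact for negatives too, as a Nat)
def pvEnc (x : Int) : Nat := (PySem.Int.mod x 17179869184).toNat

-- p = [0]; for x in nums: p.append(p[-1] ^ x)
def pvPfx : Int → List Int → List Int
  | c, [] => [c]
  | c, x :: t => c :: pvPfx (PySem.Int.bxor c x) t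

-- body of the main loop (one start index i: insert p[i+1], query with p[i])
def pvBody (p : List Int) (s : PvTrie × List Int) (i : Nat) : PvTrie × List Int :=
  let root := pvIns 34 s.1 (pvEnc (PySem.List.pyGetD p ((i : Int) + 1) 0)) ((i : Int) + 1)
  let q := pvQry 34 root (pvEnc (PySem.List.pyGetD p (i : Int) 0)) 8589934592 0
  let best : Int := if q.1 >>> 33 != 0 then (q.1 : Int) - 17179869184 else (q.1 : Int)
  (root, if best > 0 then s.2.set i (q.2 - (i : Int)) else s.2)

def smallestSubarrays2_alt (nums : List Int) : List Int :=
  ((List.range nums.length).reverse.foldl (pvBody (pvPfx 0 nums))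
    (.nil, List.replicate nums.length 1)).2

-- ===== PRECONDITION & SPEC =====
def Spec_smallestSubarrays2 (nums : List Int) (out : List Int) : Prop := out = smallestSubarrays2_alt nums
instance (nums : List Int) (out : List Int) : Decidable (Spec_smallestSubarrays2 nums out) := by unfold Spec_smallestSubarrays2; infer_instance

-- ===== CLAIM (what is proved, stated in full; the proofs are below) =====
def Claim_equal_smallestSubarrays2 : Prop := ∀ (nums : List Int), Dom_smallestSubarrays2 nums → Spec_smallestSubarrays2 nums (smallestSubarrays2 nums)

-- ===== LEMMAS AND PROOFS =====

-- ---------- generic Nat bit lemmas ----------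

theorem pvXsplit (k a b x y : Nat) (hx : x < 2^k) (hy : y < 2^k) :
    (a*2^k + x) ^^^ (b*2^k + y) = (a^^^b)*2^k + (x ^^^ y) := by
  have hp : 0 < 2^k := by positivity
  have hd : ∀ (c z : Nat), z < 2^k → (c*2^k + z) / 2^k = c := by
    intro c z hz
    rw [Nat.mul_comm c (2^k), Nat.mul_add_div hp, Nat.div_eq_of_lt hz, Nat.add_zero]
  have hm : ∀ (c z : Nat), z < 2^k → (c*2^k + z) % 2^k = z := by
    intro c z hz
    rw [Nat.mul_comm c (2^k), Nat.mul_add_mod, Nat.mod_eq_of_lt hz]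
  have hmod : ((a*2^k + x) ^^^ (b*2^k + y)) % 2^k = x ^^^ y := by
    rw [Nat.xor_mod_two_pow, hm a x hx, hm b y hy]
  have hdiv : ((a*2^k + x) ^^^ (b*2^k + y)) / 2^k = a ^^^ b := by
    rw [← Nat.shiftRight_eq_div_pow, Nat.shiftRight_xor_distrib,
        Nat.shiftRight_eq_div_pow, Nat.shiftRight_eq_div_pow, hd a x hx, hd b y hy]
  have hfull := Nat.mod_add_div' ((a*2^k + x) ^^^ (b*2^k + y)) (2^k)
  rw [hmod, hdiv] at hfull
  omega

theorem pvCompl (k : Nat) : ∀ w, w < 2^k → w ^^^ (2^k - 1) = 2^k - 1 - w := by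
  induction k with
  | zero => intro w hw; interval_cases w; decide
  | succ k ih =>
    intro w hw
    have hp : 0 < 2^k := by positivity
    have hlt : w % 2^k < 2^k := Nat.mod_lt _ hp
    have hsp : (2:Nat)^(k+1) = 2^k*2 := by rw [pow_succ]
    have hq : w / 2^k < 2 := by
      rw [Nat.div_lt_iff_lt_mul hp]; omega
    have hw' : w % 2^k + w / 2^k * 2^k = w := Nat.mod_add_div' w (2^k)
    have he : (2:Nat)^k - 1 < 2^k := by omega
    have h1 : (2:Nat)^(k+1) - 1 = 1*2^k + (2^k - 1) := by omega
    obtain ⟨a, r, ha, hr, rfl⟩ : ∃ a r, a < 2 ∧ r < 2^k ∧ w = a*2^k + r :=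
      ⟨w / 2^k, w % 2^k, hq, hlt, by omega⟩
    rw [h1, pvXsplit k a 1 r (2^k - 1) hr he, ih r hr]
    interval_cases a <;> simp <;> omega

theorem pvAddPow (k w : Nat) (h : w < 2^k) : w ^^^ 2^k = w + 2^k := by
  have := pvXsplit k 0 1 w 0 h (by positivity)
  simpa [Nat.add_comm] using this

theorem pvXorCancel (a b : Nat) : a ^^^ (a ^^^ b) = b := by
  rw [← Nat.xor_assoc, Nat.xor_self, Nat.zero_xor]

theorem pvBle (k c1 c2 x y : Nat) (hx : x < 2^k) (h : c1 < c2 ∨ (c1 = c2 ∧ x ≤ y)) :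
    c1*2^k + x ≤ c2*2^k + y := by
  rcases h with h | ⟨rfl, h⟩
  · have : c1 + 1 ≤ c2 := h
    nlinarith
  · omega

-- ---------- Int/Nat encoding bridge ----------

-- the 34-bit two's-complement range
def pvR (x : Int) : Prop := -8589934592 ≤ x ∧ x < 8589934592

theorem pvEnc_eq (x : Int) : pvEnc x = (x % 17179869184).toNat := by
  unfold pvEnc
  rw [PySem.Int.mod_eq_emod_of_pos (by norm_num : (0:Int) < 17179869184)]

theorem pvEnc_lt (x : Int) : pvEnc x < 2^34 := by
  rw [pvEnc_eq]
  have h1 : 0 ≤ x % 17179869184 := Int.emod_nonneg _ (by norm_num)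
  have h2 : x % 17179869184 < 17179869184 := Int.emod_lt_of_pos _ (by norm_num)
  omega

theorem pvEnc_nonneg (x : Int) (h0 : 0 ≤ x) (h1 : x < 8589934592) :
    pvEnc x = x.toNat := by
  rw [pvEnc_eq, Int.emod_eq_of_lt h0 (by omega)]

theorem pvEnc_negv (x : Int) (h0 : x < 0) (h1 : -8589934592 ≤ x) :
    pvEnc x = (x + 17179869184).toNat := by
  rw [pvEnc_eq]
  have : x % 17179869184 = x + 17179869184 := by omega
  rw [this]

theorem pvEnc_neg (x : Int) (h0 : x < 0) (h1 : -8589934592 ≤ x) :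
    pvEnc x = (-x - 1).toNat ^^^ 17179869183 := by
  rw [pvEnc_negv x h0 h1]
  have h34 : (2:Nat)^34 = 17179869184 := by norm_num
  have hy : (-x - 1).toNat < 2^34 := by omega
  have := pvCompl 34 _ hy
  rw [h34] at this
  have hm : (17179869184:Nat) - 1 = 17179869183 := by norm_num
  rw [hm] at this
  rw [this]
  omega

theorem pvBxorR (a b : Int) (ha : pvR a) (hb : pvR b) :
    pvR (PySem.Int.bxor a b) ∧ pvEnc (PySem.Int.bxor a b) = pvEnc a ^^^ pvEnc b := by
  obtain ⟨ha1, ha2⟩ := ha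
  obtain ⟨hb1, hb2⟩ := hb
  have h33 : (2:Nat)^33 = 8589934592 := by norm_num
  have hmm : ∀ p q : Nat, (p ^^^ 17179869183) ^^^ (q ^^^ 17179869183) = p ^^^ q := by
    intro p q
    rw [Nat.xor_comm q 17179869183, ← Nat.xor_assoc, Nat.xor_assoc p 17179869183 17179869183,
        Nat.xor_self, Nat.xor_zero]
  unfold PySem.Int.bxor
  by_cases ha0 : (0:Int) ≤ a <;> by_cases hb0 : (0:Int) ≤ b
  · have hxa : a.toNat < 2^33 := by omega
    have hxb : b.toNat < 2^33 := by omega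
    have hlt : a.toNat ^^^ b.toNat < 2^33 := Nat.xor_lt_two_pow hxa hxb
    simp only [ha0, hb0, if_pos]
    refine ⟨⟨by omega, by omega⟩, ?_⟩
    rw [pvEnc_nonneg _ (by omega) (by omega), pvEnc_nonneg a ha0 ha2, pvEnc_nonneg b hb0 hb2]
    simp
  · have hxa : a.toNat < 2^33 := by omega
    have hxb : (-b - 1).toNat < 2^33 := by omega
    have hlt : a.toNat ^^^ (-b - 1).toNat < 2^33 := Nat.xor_lt_two_pow hxa hxb
    simp only [ha0, hb0, if_pos, if_false]
    refine ⟨⟨by omega, by omega⟩, ?_⟩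
    rw [pvEnc_neg _ (by omega) (by omega), pvEnc_nonneg a ha0 ha2, pvEnc_neg b (by omega) hb1]
    have : (-(-(↑(a.toNat ^^^ (-b - 1).toNat) : Int) - 1) - 1).toNat = a.toNat ^^^ (-b - 1).toNat := by
      omega
    rw [this, Nat.xor_assoc]
  · have hxa : (-a - 1).toNat < 2^33 := by omega
    have hxb : b.toNat < 2^33 := by omega
    have hlt : (-a - 1).toNat ^^^ b.toNat < 2^33 := Nat.xor_lt_two_pow hxa hxb
    simp only [ha0, hb0, if_pos, if_false]
    refine ⟨⟨by omega, by omega⟩, ?_⟩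
    rw [pvEnc_neg _ (by omega) (by omega), pvEnc_neg a (by omega) ha1, pvEnc_nonneg b hb0 hb2]
    have : (-(-(↑((-a - 1).toNat ^^^ b.toNat) : Int) - 1) - 1).toNat = (-a - 1).toNat ^^^ b.toNat := by
      omega
    rw [this, Nat.xor_assoc, Nat.xor_comm (b.toNat) 17179869183, ← Nat.xor_assoc]
  · have hxa : (-a - 1).toNat < 2^33 := by omega
    have hxb : (-b - 1).toNat < 2^33 := by omega
    have hlt : (-a - 1).toNat ^^^ (-b - 1).toNat < 2^33 := Nat.xor_lt_two_pow hxa hxb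
    simp only [ha0, hb0, if_false]
    refine ⟨⟨by omega, by omega⟩, ?_⟩
    rw [pvEnc_nonneg _ (by omega) (by omega), pvEnc_neg a (by omega) ha1,
        pvEnc_neg b (by omega) hb1, hmm]
    simp

theorem pvEncSign (x : Int) (h : pvR x) : pvEnc x ^^^ 8589934592 = (x + 8589934592).toNat := by
  obtain ⟨h1, h2⟩ := h
  have h33 : (2:Nat)^33 = 8589934592 := by norm_num
  by_cases h0 : (0:Int) ≤ x
  · rw [pvEnc_nonneg x h0 h2, ← h33, pvAddPow 33 _ (by omega)]
    omega
  · rw [pvEnc_neg x (by omega) h1]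
    have hy : (-x - 1).toNat < 2^34 := by omega
    have hc := pvCompl 34 _ hy
    have hm : (2:Nat)^34 - 1 = 17179869183 := by norm_num
    rw [hm] at hc
    rw [hc]
    have hw : (2:Nat)^34 - 1 - (-x - 1).toNat = (2^33 - 1 - (-x-1).toNat) + 2^33 := by
      have : (2:Nat)^34 = 2^33 * 2 := by norm_num
      omega
    rw [hm] at hw
    rw [hw, ← h33]
    have hwlt : (2:Nat)^33 - 1 - (-x-1).toNat < 2^33 := by
      have : (0:Nat) < 2^33 := by positivity
      omega
    have := pvAddPow 33 _ hwlt
    calc ((2^33 - 1 - (-x-1).toNat) + 2^33) ^^^ 2^33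
        = ((2^33 - 1 - (-x-1).toNat) ^^^ 2^33) ^^^ 2^33 := by rw [this]
      _ = (2^33 - 1 - (-x-1).toNat) := by
            rw [Nat.xor_assoc, Nat.xor_self, Nat.xor_zero]
      _ = (x + 8589934592).toNat := by omega

theorem pvDec (x : Int) (h : pvR x) :
    (if pvEnc x >>> 33 != 0 then ((pvEnc x : Int)) - 17179869184 else ((pvEnc x : Int))) = x := by
  obtain ⟨h1, h2⟩ := h
  rw [Nat.shiftRight_eq_div_pow]
  have h33 : (2:Nat)^33 = 8589934592 := by norm_num
  by_cases h0 : (0:Int) ≤ x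
  · rw [pvEnc_nonneg x h0 h2]
    have : x.toNat / 2^33 = 0 := Nat.div_eq_of_lt (by omega)
    rw [this]
    simp
    omega
  · rw [pvEnc_negv x (by omega) h1]
    have hge : 2^33 ≤ (x + 17179869184).toNat := by omega
    have hpos : 0 < (x + 17179869184).toNat / 2^33 := Nat.div_pos hge (by positivity)
    have : ((x + 17179869184).toNat / 2^33 != 0) = true := by
      simp only [bne_iff_ne, ne_eq]
      omega
    rw [this]
    simp
    omega

theorem pvSignLe (x y : Int) (hx : pvR x) (hy : pvR y) :
    (pvEnc x ^^^ 8589934592 ≤ pvEnc y ^^^ 8589934592) ↔ x ≤ y := by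
  unfold pvR at hx hy
  rw [pvEncSign x hx, pvEncSign y hy]
  omega

-- ---------- trie representation invariant ----------

def pvHalf (S : List (Nat × Int)) (k b : Nat) : List (Nat × Int) :=
  (S.filter (fun p => p.1 / 2^k % 2 == b)).map (fun p => (p.1 % 2^k, p.2))

def pvLB (m : Int) (S : List (Nat × Int)) : Prop := (∀ p ∈ S, m ≤ p.2) ∧ ∃ p ∈ S, p.2 = m

def pvRepr : Nat → PvTrie → List (Nat × Int) → Prop
  | 0, t, S => (match t with
      | .nil => S = []
      | .node _ _ m => S ≠ [] ∧ pvLB m S) ∧ ∀ p ∈ S, p.1 = 0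
  | k+1, t, S => (match t with
      | .nil => S = []
      | .node l r m => S ≠ [] ∧ pvLB m S ∧ pvRepr k l (pvHalf S k 0) ∧ pvRepr k r (pvHalf S k 1))
      ∧ ∀ p ∈ S, p.1 < 2^(k+1)

-- ---------- helpers ----------

theorem pvRepr_nil (k : Nat) : pvRepr k .nil [] := by
  cases k <;> simp [pvRepr]

theorem pvRepr_nil_iff (k : Nat) (S : List (Nat × Int)) (h : pvRepr k .nil S) : S = [] := by
  cases k <;> exact h.1

theorem pvRepr_node_ne (k : Nat) (l r : PvTrie) (m : Int) (S : List (Nat × Int))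
    (h : pvRepr k (.node l r m) S) : S ≠ [] := by
  cases k <;> exact h.1.1

theorem pvHalf_cons (x : Nat × Int) (S : List (Nat × Int)) (k b : Nat) :
    pvHalf (x :: S) k b = if x.1 / 2^k % 2 = b
      then (x.1 % 2^k, x.2) :: pvHalf S k b else pvHalf S k b := by
  simp only [pvHalf, List.filter_cons]
  by_cases h : x.1 / 2^k % 2 = b <;> simp [h]

theorem pvHalf_mem (S : List (Nat × Int)) (k b : Nat) (q : Nat × Int) :
    q ∈ pvHalf S k b ↔ ∃ P ∈ S, P.1 / 2^k % 2 = b ∧ q = (P.1 % 2^k, P.2) := by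
  simp only [pvHalf, List.mem_map, List.mem_filter]
  constructor
  · rintro ⟨P, ⟨hP, hb⟩, rfl⟩
    exact ⟨P, hP, by simpa using hb, rfl⟩
  · rintro ⟨P, hP, hb, rfl⟩
    exact ⟨P, ⟨hP, by simpa using hb⟩, rfl⟩

theorem pvLB_single (u : Nat) (idx : Int) : pvLB idx [(u, idx)] := by
  constructor
  · intro p hp; simp at hp; simp [hp]
  · exact ⟨(u, idx), by simp⟩

theorem pvLB_cons (m idx : Int) (u : Nat) (S : List (Nat × Int)) (h : pvLB m S) :
    pvLB (min m idx) ((u, idx) :: S) := by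
  obtain ⟨hlb, p0, hp0, he0⟩ := h
  constructor
  · intro p hp
    rcases List.mem_cons.mp hp with rfl | hp
    · simp
    · have := hlb p hp
      omega
  · rcases (by omega : m ≤ idx ∨ idx < m) with h | h
    · exact ⟨p0, List.mem_cons_of_mem _ hp0, by omega⟩
    · exact ⟨(u, idx), List.mem_cons_self, by simp; omega⟩

theorem pvBitMod (u k : Nat) : (u % 2^(k+1)) / 2^k = u / 2^k % 2 := by
  have h : (2:Nat)^(k+1) = 2^k * 2 := by rw [pow_succ]
  rw [h, Nat.mod_mul]
  have hlt : u % 2^k < 2^k := Nat.mod_lt _ (by positivity)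
  rw [Nat.add_mul_div_left _ _ (by positivity : (0:Nat) < 2^k), Nat.div_eq_of_lt hlt]
  omega

theorem pvModMod (u k : Nat) : (u % 2^(k+1)) % 2^k = u % 2^k :=
  Nat.mod_mod_of_dvd u ⟨2, by rw [pow_succ]⟩

theorem pvTopLt (k x : Nat) (h : x < 2^(k+1)) : x / 2^k < 2 := by
  rw [Nat.div_lt_iff_lt_mul (by positivity : (0:Nat) < 2^k)]
  have : (2:Nat)^(k+1) = 2^k * 2 := by rw [pow_succ]
  omega

theorem pvSplit2 (k A B : Nat) (_hA : A < 2^(k+1)) (_hB : B < 2^(k+1)) :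
    A ^^^ B = (A/2^k ^^^ B/2^k)*2^k + (A%2^k ^^^ B%2^k) := by
  have hA' : A % 2^k + A / 2^k * 2^k = A := Nat.mod_add_div' A (2^k)
  have hB' : B % 2^k + B / 2^k * 2^k = B := Nat.mod_add_div' B (2^k)
  have hAlt : A % 2^k < 2^k := Nat.mod_lt _ (by positivity)
  have hBlt : B % 2^k < 2^k := Nat.mod_lt _ (by positivity)
  calc A ^^^ B = ((A/2^k)*2^k + A%2^k) ^^^ ((B/2^k)*2^k + B%2^k) := by
        congr 1 <;> omega
    _ = (A/2^k ^^^ B/2^k)*2^k + (A%2^k ^^^ B%2^k) := pvXsplit k _ _ _ _ hAlt hBlt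

-- f-decomposition of the comparison value
theorem pvF (k u mask x : Nat) (hx : x < 2^(k+1)) :
    ((u % 2^(k+1)) ^^^ x) ^^^ (mask % 2^(k+1))
      = (((u / 2^k % 2) ^^^ x/2^k) ^^^ mask / 2^k % 2)*2^k
        + (((u % 2^k) ^^^ x % 2^k) ^^^ mask % 2^k) := by
  have hu : u % 2^(k+1) < 2^(k+1) := Nat.mod_lt _ (by positivity)
  have hm : mask % 2^(k+1) < 2^(k+1) := Nat.mod_lt _ (by positivity)
  have hX : (u % 2^(k+1)) ^^^ x < 2^(k+1) := Nat.xor_lt_two_pow hu hx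
  rw [pvSplit2 k _ _ hX hm]
  rw [pvSplit2 k _ _ hu hx]
  have hlow : (u % 2^(k+1)) % 2^k ^^^ x % 2^k < 2^k :=
    Nat.xor_lt_two_pow (Nat.mod_lt _ (by positivity)) (Nat.mod_lt _ (by positivity))
  have h1 : ∀ c z : Nat, z < 2^k → (c*2^k + z) / 2^k = c := by
    intro c z hz
    rw [Nat.mul_comm c (2^k), Nat.mul_add_div (by positivity), Nat.div_eq_of_lt hz, Nat.add_zero]
  have h2 : ∀ c z : Nat, z < 2^k → (c*2^k + z) % 2^k = z := by
    intro c z hz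
    rw [Nat.mul_comm c (2^k), Nat.mul_add_mod, Nat.mod_eq_of_lt hz]
  rw [h1 _ _ hlow, h2 _ _ hlow, pvBitMod u k, pvModMod u k, pvBitMod mask k, pvModMod mask k]

-- ---------- insert spec ----------

theorem pvIns_spec : ∀ (k : Nat) (t : PvTrie) (S : List (Nat × Int)) (u : Nat) (idx : Int),
    pvRepr k t S → pvRepr k (pvIns k t u idx) ((u % 2^k, idx) :: S) := by
  intro k
  induction k with
  | zero =>
    intro t S u idx h
    obtain ⟨hm, hv⟩ := h
    cases t with
    | nil =>
      subst hm
      refine ⟨⟨by simp, pvLB_single _ _⟩, ?_⟩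
      intro p hp
      simp at hp
      simp [hp, Nat.mod_one]
    | node l r m =>
      obtain ⟨hne, hlb⟩ := hm
      refine ⟨⟨by simp, pvLB_cons m idx _ S hlb⟩, ?_⟩
      intro p hp
      rcases List.mem_cons.mp hp with rfl | hp
      · simp [Nat.mod_one]
      · exact hv p hp
  | succ k ih =>
    intro t S u idx h
    obtain ⟨hm, hv⟩ := h
    have hult : u % 2^(k+1) < 2^(k+1) := Nat.mod_lt _ (by positivity)
    have hbit : (u % 2^(k+1)) / 2^k % 2 = u / 2^k % 2 := by
      rw [pvBitMod u k]
      exact Nat.mod_mod_of_dvd _ ⟨1, by ring⟩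
    have hmm : (u % 2^(k+1)) % 2^k = u % 2^k := pvModMod u k
    simp only [pvIns, Nat.shiftRight_eq_div_pow, Nat.and_one_is_mod]
    cases t with
    | nil =>
      subst hm
      have hnil : pvHalf ([] : List (Nat × Int)) k 0 = [] := by simp [pvHalf]
      have hnil1 : pvHalf ([] : List (Nat × Int)) k 1 = [] := by simp [pvHalf]
      rcases Nat.mod_two_eq_zero_or_one (u / 2^k) with hb | hb <;> rw [hb]
      · simp only [show ((0:Nat) == 1) = false from rfl, Bool.false_eq_true, if_false]
        refine ⟨⟨by simp, pvLB_single _ _, ?_, ?_⟩, ?_⟩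
        · rw [pvHalf_cons]
          simp only [hbit, hb, if_pos, hmm, hnil]
          exact ih .nil [] u idx (pvRepr_nil k)
        · rw [pvHalf_cons]
          simp only [hbit, hb]
          simp only [show ¬ ((0:Nat) = 1) from by omega, if_false, hnil1]
          exact pvRepr_nil k
        · intro p hp
          simp at hp
          simp [hp, hult]
      · simp only [show ((1:Nat) == 1) = true from rfl, if_true]
        refine ⟨⟨by simp, pvLB_single _ _, ?_, ?_⟩, ?_⟩
        · rw [pvHalf_cons]
          simp only [hbit, hb]
          simp only [show ¬ ((1:Nat) = 0) from by omega, if_false, hnil]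
          exact pvRepr_nil k
        · rw [pvHalf_cons]
          simp only [hbit, hb, if_pos, hmm, hnil1]
          exact ih .nil [] u idx (pvRepr_nil k)
        · intro p hp
          simp at hp
          simp [hp, hult]
    | node l r m =>
      obtain ⟨hne, hlb, hl, hr⟩ := hm
      rcases Nat.mod_two_eq_zero_or_one (u / 2^k) with hb | hb <;> rw [hb]
      · simp only [show ((0:Nat) == 1) = false from rfl, Bool.false_eq_true, if_false]
        refine ⟨⟨by simp, pvLB_cons m idx _ S hlb, ?_, ?_⟩, ?_⟩
        · rw [pvHalf_cons]
          simp only [hbit, hb, if_pos, hmm]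
          exact ih l (pvHalf S k 0) u idx hl
        · rw [pvHalf_cons]
          simp only [hbit, hb]
          simp only [show ¬ ((0:Nat) = 1) from by omega, if_false]
          exact hr
        · intro p hp
          rcases List.mem_cons.mp hp with rfl | hp
          · exact hult
          · exact hv p hp
      · simp only [show ((1:Nat) == 1) = true from rfl, if_true]
        refine ⟨⟨by simp, pvLB_cons m idx _ S hlb, ?_, ?_⟩, ?_⟩
        · rw [pvHalf_cons]
          simp only [hbit, hb]
          simp only [show ¬ ((1:Nat) = 0) from by omega, if_false]
          exact hl
        · rw [pvHalf_cons]
          simp only [hbit, hb, if_pos, hmm]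
          exact ih r (pvHalf S k 1) u idx hr
        · intro p hp
          rcases List.mem_cons.mp hp with rfl | hp
          · exact hult
          · exact hv p hp

-- one recursion step of the greedy query, factored over the chosen bit cb
theorem pvQryStep (k : Nat)
    (ih : ∀ (t : PvTrie) (S : List (Nat × Int)) (u mask acc : Nat),
      pvRepr k t S → S ≠ [] →
      ∃ p ∈ S, pvQry k t u mask acc = (acc + ((u % 2^k) ^^^ p.1), p.2) ∧
        (∀ q ∈ S, ((u % 2^k) ^^^ q.1) ^^^ (mask % 2^k) ≤ ((u % 2^k) ^^^ p.1) ^^^ (mask % 2^k)) ∧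
        (∀ q ∈ S, q.1 = p.1 → p.2 ≤ q.2))
    (child : PvTrie) (S : List (Nat × Int)) (u mask acc cb : Nat)
    (hv : ∀ q ∈ S, q.1 < 2^(k+1))
    (hrep : pvRepr k child (pvHalf S k cb))
    (hhne : pvHalf S k cb ≠ [])
    (hother : ∀ q ∈ S, q.1 / 2^k % 2 = cb ∨
      (((u/2^k%2) ^^^ (q.1/2^k)) ^^^ (mask/2^k%2) < ((u/2^k%2) ^^^ cb) ^^^ (mask/2^k%2))) :
    ∃ p ∈ S, pvQry k child u mask (acc + ((cb ^^^ (u/2^k%2)) <<< k))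
        = (acc + ((u % 2^(k+1)) ^^^ p.1), p.2) ∧
      (∀ q ∈ S, ((u % 2^(k+1)) ^^^ q.1) ^^^ (mask % 2^(k+1))
          ≤ ((u % 2^(k+1)) ^^^ p.1) ^^^ (mask % 2^(k+1))) ∧
      (∀ q ∈ S, q.1 = p.1 → p.2 ≤ q.2) := by
  obtain ⟨p', hp'mem, hq, hdom, hmin⟩ :=
    ih child (pvHalf S k cb) u mask (acc + ((cb ^^^ (u/2^k%2)) <<< k)) hrep hhne
  obtain ⟨P, hPmem, hPb, hp'e⟩ := (pvHalf_mem S k cb p').mp hp'mem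
  subst hp'e
  have hPlt := hv P hPmem
  have hPtop2 := pvTopLt k P.1 hPlt
  have hPdiv : P.1 / 2^k = cb := by rw [← Nat.mod_eq_of_lt hPtop2]; exact hPb
  have hval : ∀ x : Nat, x < 2^(k+1) → x / 2^k % 2 = cb →
      acc + ((cb ^^^ (u/2^k%2)) <<< k) + ((u % 2^k) ^^^ x % 2^k)
        = acc + ((u % 2^(k+1)) ^^^ x) := by
    intro x hx hxb
    have hxt := pvTopLt k x hx
    have hxdiv : x / 2^k = cb := by rw [← Nat.mod_eq_of_lt hxt]; exact hxb
    have hs := pvSplit2 k (u % 2^(k+1)) x (Nat.mod_lt _ (by positivity)) hx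
    rw [pvBitMod u k, pvModMod u k, hxdiv] at hs
    rw [Nat.shiftLeft_eq, hs, Nat.xor_comm (u/2^k%2) cb]
    omega
  refine ⟨P, hPmem, ?_, ?_, ?_⟩
  · rw [hq]
    rw [Prod.mk.injEq]
    exact ⟨hval P.1 hPlt hPb, rfl⟩
  · intro q hq2
    have hqlt := hv q hq2
    have hqtop := pvTopLt k q.1 hqlt
    rw [pvF k u mask q.1 hqlt, pvF k u mask P.1 hPlt]
    have hLq : ((u % 2^k) ^^^ q.1 % 2^k) ^^^ mask % 2^k < 2^k :=
      Nat.xor_lt_two_pow (Nat.xor_lt_two_pow (Nat.mod_lt _ (by positivity))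
        (Nat.mod_lt _ (by positivity))) (Nat.mod_lt _ (by positivity))
    rcases hother q hq2 with hsame | hlt
    · have hqdiv : q.1 / 2^k = cb := by rw [← Nat.mod_eq_of_lt hqtop]; exact hsame
      have hmemhalf : (q.1 % 2^k, q.2) ∈ pvHalf S k cb :=
        (pvHalf_mem S k cb _).mpr ⟨q, hq2, hsame, rfl⟩
      have hle := hdom _ hmemhalf
      exact pvBle k _ _ _ _ hLq (Or.inr ⟨by rw [hqdiv, hPdiv], hle⟩)
    · rw [hPdiv]
      exact pvBle k _ _ _ _ hLq (Or.inl hlt)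
  · intro q hq2 hqe
    have hsame : q.1 / 2^k % 2 = cb := by rw [hqe]; exact hPb
    have hmemhalf : (q.1 % 2^k, q.2) ∈ pvHalf S k cb :=
      (pvHalf_mem S k cb _).mpr ⟨q, hq2, hsame, rfl⟩
    exact hmin (q.1 % 2^k, q.2) hmemhalf (by simp [hqe])

theorem pvHalf_empty_bit (S : List (Nat × Int)) (k b : Nat) (q : Nat × Int)
    (hS : pvHalf S k b = []) (hq : q ∈ S) : q.1 / 2^k % 2 ≠ b := by
  intro h
  have := (pvHalf_mem S k b (q.1 % 2^k, q.2)).mpr ⟨q, hq, h, rfl⟩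
  rw [hS] at this
  simp at this

theorem pvQry_spec : ∀ (k : Nat) (t : PvTrie) (S : List (Nat × Int)) (u mask acc : Nat),
    pvRepr k t S → S ≠ [] →
    ∃ p ∈ S, pvQry k t u mask acc = (acc + ((u % 2^k) ^^^ p.1), p.2) ∧
      (∀ q ∈ S, ((u % 2^k) ^^^ q.1) ^^^ (mask % 2^k) ≤ ((u % 2^k) ^^^ p.1) ^^^ (mask % 2^k)) ∧
      (∀ q ∈ S, q.1 = p.1 → p.2 ≤ q.2) := by
  intro k
  induction k with
  | zero =>
    intro t S u mask acc h hne
    cases t with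
    | nil => exact absurd (pvRepr_nil_iff 0 S h) hne
    | node l r m =>
      obtain ⟨⟨_, hlb⟩, hv⟩ := h
      obtain ⟨hmin, p0, hp0, he⟩ := hlb
      refine ⟨p0, hp0, ?_, ?_, ?_⟩
      · show (acc, m) = _
        have h0 : p0.1 = 0 := hv p0 hp0
        simp [h0, Nat.mod_one, he]
      · intro q hq
        have h1 : q.1 = 0 := hv q hq
        have h0 : p0.1 = 0 := hv p0 hp0
        simp [h1, h0]
      · intro q hq _
        rw [he]
        exact hmin q hq
  | succ k ih =>
    intro t S u mask acc h hne
    cases t with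
    | nil => exact absurd (pvRepr_nil_iff _ S h) hne
    | node l r m =>
      obtain ⟨⟨hSne, hlb, hl, hr⟩, hv⟩ := h
      rcases Nat.mod_two_eq_zero_or_one (u / 2^k) with hub | hub <;>
        rcases Nat.mod_two_eq_zero_or_one (mask / 2^k) with hmb | hmb
      · -- ub = 0, mb = 0, want = 1, chosen child r
        cases hcr : r with
        | node l' r' m' =>
          have hrep : pvRepr k (.node l' r' m') (pvHalf S k 1) := hcr ▸ hr
          have hhne : pvHalf S k 1 ≠ [] := pvRepr_node_ne k l' r' m' _ hrep
          have hother : ∀ q ∈ S, q.1 / 2^k % 2 = 1 ∨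
              (((u/2^k%2) ^^^ (q.1/2^k)) ^^^ (mask/2^k%2) < ((u/2^k%2) ^^^ 1) ^^^ (mask/2^k%2)) := by
            intro q hq
            rcases Nat.mod_two_eq_zero_or_one (q.1/2^k) with hqb | hqb
            · right
              have hqd : q.1/2^k = 0 := by
                rw [← Nat.mod_eq_of_lt (pvTopLt k q.1 (hv q hq))]; exact hqb
              rw [hub, hmb, hqd]
              decide
            · left; exact hqb
          obtain ⟨p, hp, he, hdomi, hmini⟩ :=
            pvQryStep k ih (.node l' r' m') S u mask acc 1 hv hrep hhne hother
          refine ⟨p, hp, ?_, hdomi, hmini⟩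
          rw [hub] at he
          rw [← he]
          simp only [pvQry, Nat.shiftRight_eq_div_pow, Nat.and_one_is_mod, hub, hmb]
          norm_num
        | nil =>
          have h1e : pvHalf S k 1 = [] := pvRepr_nil_iff k _ (hcr ▸ hr)
          have hall : ∀ q ∈ S, q.1/2^k%2 = 0 := by
            intro q hq
            have hnb := pvHalf_empty_bit S k 1 q h1e hq
            rcases Nat.mod_two_eq_zero_or_one (q.1/2^k) with hqb | hqb
            · exact hqb
            · exact absurd hqb hnb
          have h0ne : pvHalf S k 0 ≠ [] := by
            obtain ⟨q0, hq0⟩ := List.exists_mem_of_ne_nil S hne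
            intro hemp
            exact pvHalf_empty_bit S k 0 q0 hemp hq0 (hall q0 hq0)
          cases hcl : l with
          | nil => exact absurd (pvRepr_nil_iff k _ (hcl ▸ hl)) h0ne
          | node l' r' m' =>
            have hrep : pvRepr k (.node l' r' m') (pvHalf S k 0) := hcl ▸ hl
            have hother : ∀ q ∈ S, q.1 / 2^k % 2 = 0 ∨
                (((u/2^k%2) ^^^ (q.1/2^k)) ^^^ (mask/2^k%2) < ((u/2^k%2) ^^^ 0) ^^^ (mask/2^k%2)) :=
              fun q hq => Or.inl (hall q hq)
            obtain ⟨p, hp, he, hdomi, hmini⟩ :=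
              pvQryStep k ih (.node l' r' m') S u mask acc 0 hv hrep h0ne hother
            refine ⟨p, hp, ?_, hdomi, hmini⟩
            rw [hub] at he
            rw [← he]
            simp only [pvQry, Nat.shiftRight_eq_div_pow, Nat.and_one_is_mod, hub, hmb]
            norm_num
      · -- ub = 0, mb = 1, want = 0, chosen child l
        cases hcl : l with
        | node l' r' m' =>
          have hrep : pvRepr k (.node l' r' m') (pvHalf S k 0) := hcl ▸ hl
          have hhne : pvHalf S k 0 ≠ [] := pvRepr_node_ne k l' r' m' _ hrep
          have hother : ∀ q ∈ S, q.1 / 2^k % 2 = 0 ∨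
              (((u/2^k%2) ^^^ (q.1/2^k)) ^^^ (mask/2^k%2) < ((u/2^k%2) ^^^ 0) ^^^ (mask/2^k%2)) := by
            intro q hq
            rcases Nat.mod_two_eq_zero_or_one (q.1/2^k) with hqb | hqb
            · left; exact hqb
            · right
              have hqd : q.1/2^k = 1 := by
                rw [← Nat.mod_eq_of_lt (pvTopLt k q.1 (hv q hq))]; exact hqb
              rw [hub, hmb, hqd]
              decide

          obtain ⟨p, hp, he, hdomi, hmini⟩ :=
            pvQryStep k ih (.node l' r' m') S u mask acc 0 hv hrep hhne hother
          refine ⟨p, hp, ?_, hdomi, hmini⟩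
          rw [hub] at he
          rw [← he]
          simp only [pvQry, Nat.shiftRight_eq_div_pow, Nat.and_one_is_mod, hub, hmb]
          norm_num
        | nil =>
          have h1e : pvHalf S k 0 = [] := pvRepr_nil_iff k _ (hcl ▸ hl)
          have hall : ∀ q ∈ S, q.1/2^k%2 = 1 := by
            intro q hq
            have hnb := pvHalf_empty_bit S k 0 q h1e hq
            rcases Nat.mod_two_eq_zero_or_one (q.1/2^k) with hqb | hqb
            · exact absurd hqb hnb
            · exact hqb
          have h0ne : pvHalf S k 1 ≠ [] := by
            obtain ⟨q0, hq0⟩ := List.exists_mem_of_ne_nil S hne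
            intro hemp
            exact pvHalf_empty_bit S k 1 q0 hemp hq0 (hall q0 hq0)
          cases hcr : r with
          | nil => exact absurd (pvRepr_nil_iff k _ (hcr ▸ hr)) h0ne
          | node l' r' m' =>
            have hrep : pvRepr k (.node l' r' m') (pvHalf S k 1) := hcr ▸ hr
            have hother : ∀ q ∈ S, q.1 / 2^k % 2 = 1 ∨
                (((u/2^k%2) ^^^ (q.1/2^k)) ^^^ (mask/2^k%2) < ((u/2^k%2) ^^^ 1) ^^^ (mask/2^k%2)) :=
              fun q hq => Or.inl (hall q hq)
            obtain ⟨p, hp, he, hdomi, hmini⟩ :=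
              pvQryStep k ih (.node l' r' m') S u mask acc 1 hv hrep h0ne hother
            refine ⟨p, hp, ?_, hdomi, hmini⟩
            rw [hub] at he
            rw [← he]
            simp only [pvQry, Nat.shiftRight_eq_div_pow, Nat.and_one_is_mod, hub, hmb]
            norm_num
      · -- ub = 1, mb = 0, want = 0, chosen child l
        cases hcl : l with
        | node l' r' m' =>
          have hrep : pvRepr k (.node l' r' m') (pvHalf S k 0) := hcl ▸ hl
          have hhne : pvHalf S k 0 ≠ [] := pvRepr_node_ne k l' r' m' _ hrep
          have hother : ∀ q ∈ S, q.1 / 2^k % 2 = 0 ∨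
              (((u/2^k%2) ^^^ (q.1/2^k)) ^^^ (mask/2^k%2) < ((u/2^k%2) ^^^ 0) ^^^ (mask/2^k%2)) := by
            intro q hq
            rcases Nat.mod_two_eq_zero_or_one (q.1/2^k) with hqb | hqb
            · left; exact hqb
            · right
              have hqd : q.1/2^k = 1 := by
                rw [← Nat.mod_eq_of_lt (pvTopLt k q.1 (hv q hq))]; exact hqb
              rw [hub, hmb, hqd]
              decide

          obtain ⟨p, hp, he, hdomi, hmini⟩ :=
            pvQryStep k ih (.node l' r' m') S u mask acc 0 hv hrep hhne hother
          refine ⟨p, hp, ?_, hdomi, hmini⟩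
          rw [hub] at he
          rw [← he]
          simp only [pvQry, Nat.shiftRight_eq_div_pow, Nat.and_one_is_mod, hub, hmb]
          norm_num
        | nil =>
          have h1e : pvHalf S k 0 = [] := pvRepr_nil_iff k _ (hcl ▸ hl)
          have hall : ∀ q ∈ S, q.1/2^k%2 = 1 := by
            intro q hq
            have hnb := pvHalf_empty_bit S k 0 q h1e hq
            rcases Nat.mod_two_eq_zero_or_one (q.1/2^k) with hqb | hqb
            · exact absurd hqb hnb
            · exact hqb
          have h0ne : pvHalf S k 1 ≠ [] := by
            obtain ⟨q0, hq0⟩ := List.exists_mem_of_ne_nil S hne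
            intro hemp
            exact pvHalf_empty_bit S k 1 q0 hemp hq0 (hall q0 hq0)
          cases hcr : r with
          | nil => exact absurd (pvRepr_nil_iff k _ (hcr ▸ hr)) h0ne
          | node l' r' m' =>
            have hrep : pvRepr k (.node l' r' m') (pvHalf S k 1) := hcr ▸ hr
            have hother : ∀ q ∈ S, q.1 / 2^k % 2 = 1 ∨
                (((u/2^k%2) ^^^ (q.1/2^k)) ^^^ (mask/2^k%2) < ((u/2^k%2) ^^^ 1) ^^^ (mask/2^k%2)) :=
              fun q hq => Or.inl (hall q hq)
            obtain ⟨p, hp, he, hdomi, hmini⟩ :=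
              pvQryStep k ih (.node l' r' m') S u mask acc 1 hv hrep h0ne hother
            refine ⟨p, hp, ?_, hdomi, hmini⟩
            rw [hub] at he
            rw [← he]
            simp only [pvQry, Nat.shiftRight_eq_div_pow, Nat.and_one_is_mod, hub, hmb]
            norm_num
      · -- ub = 1, mb = 1, want = 1, chosen child r
        cases hcr : r with
        | node l' r' m' =>
          have hrep : pvRepr k (.node l' r' m') (pvHalf S k 1) := hcr ▸ hr
          have hhne : pvHalf S k 1 ≠ [] := pvRepr_node_ne k l' r' m' _ hrep
          have hother : ∀ q ∈ S, q.1 / 2^k % 2 = 1 ∨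
              (((u/2^k%2) ^^^ (q.1/2^k)) ^^^ (mask/2^k%2) < ((u/2^k%2) ^^^ 1) ^^^ (mask/2^k%2)) := by
            intro q hq
            rcases Nat.mod_two_eq_zero_or_one (q.1/2^k) with hqb | hqb
            · right
              have hqd : q.1/2^k = 0 := by
                rw [← Nat.mod_eq_of_lt (pvTopLt k q.1 (hv q hq))]; exact hqb
              rw [hub, hmb, hqd]
              decide
            · left; exact hqb
          obtain ⟨p, hp, he, hdomi, hmini⟩ :=
            pvQryStep k ih (.node l' r' m') S u mask acc 1 hv hrep hhne hother
          refine ⟨p, hp, ?_, hdomi, hmini⟩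
          rw [hub] at he
          rw [← he]
          simp only [pvQry, Nat.shiftRight_eq_div_pow, Nat.and_one_is_mod, hub, hmb]
          norm_num
        | nil =>
          have h1e : pvHalf S k 1 = [] := pvRepr_nil_iff k _ (hcr ▸ hr)
          have hall : ∀ q ∈ S, q.1/2^k%2 = 0 := by
            intro q hq
            have hnb := pvHalf_empty_bit S k 1 q h1e hq
            rcases Nat.mod_two_eq_zero_or_one (q.1/2^k) with hqb | hqb
            · exact hqb
            · exact absurd hqb hnb
          have h0ne : pvHalf S k 0 ≠ [] := by
            obtain ⟨q0, hq0⟩ := List.exists_mem_of_ne_nil S hne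
            intro hemp
            exact pvHalf_empty_bit S k 0 q0 hemp hq0 (hall q0 hq0)
          cases hcl : l with
          | nil => exact absurd (pvRepr_nil_iff k _ (hcl ▸ hl)) h0ne
          | node l' r' m' =>
            have hrep : pvRepr k (.node l' r' m') (pvHalf S k 0) := hcl ▸ hl
            have hother : ∀ q ∈ S, q.1 / 2^k % 2 = 0 ∨
                (((u/2^k%2) ^^^ (q.1/2^k)) ^^^ (mask/2^k%2) < ((u/2^k%2) ^^^ 0) ^^^ (mask/2^k%2)) :=
              fun q hq => Or.inl (hall q hq)
            obtain ⟨p, hp, he, hdomi, hmini⟩ :=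
              pvQryStep k ih (.node l' r' m') S u mask acc 0 hv hrep h0ne hother
            refine ⟨p, hp, ?_, hdomi, hmini⟩
            rw [hub] at he
            rw [← he]
            simp only [pvQry, Nat.shiftRight_eq_div_pow, Nat.and_one_is_mod, hub, hmb]
            norm_num

-- ---------- A-side abstraction (inner loop of A as a recursion over the suffix) ----------

theorem pv_bxor_assoc (a b c : Int) :
    PySem.Int.bxor a (PySem.Int.bxor b c) = PySem.Int.bxor (PySem.Int.bxor a b) c := by
  unfold PySem.Int.bxor
  have h3 : ∀ n : Nat, ¬ ((1:Int) ≤ -(n:Int)) := by intro n; omega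
  by_cases ha : (0:Int) ≤ a <;> by_cases hb : (0:Int) ≤ b <;> by_cases hc : (0:Int) ≤ c <;>
    simp [ha, hb, hc, h3, Nat.xor_assoc]

-- window xors of a start: (xor of l[0..t-1], t) for t = 1..len, in order
def cands : List Int → List (Int × Int)
  | [] => []
  | v :: t => (v, 1) :: (cands t).map (fun p => (PySem.Int.bxor v p.1, p.2 + 1))

def pstep (b p : Int × Int) : Int × Int := if p.1 > b.1 then p else b

def pick (l : List (Int × Int)) : Int := (l.foldl pstep (0, 1)).2

-- A's inner loop abstracted: state (running xor, current max, recorded result)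
def aPick : List Int → Int → Int → Int → Int → Int
  | [], _, _, _, r => r
  | v :: t, x, cm, pos, r =>
    let x' := PySem.Int.bxor x v
    if x' > cm then aPick t x' x' (pos + 1) pos else aPick t x' cm (pos + 1) r

def suffPick : List Int → List Int
  | [] => []
  | v :: t => aPick (v :: t) 0 0 1 1 :: suffPick t

theorem aPick_eq_fold (l : List Int) : ∀ (x cm pos r : Int),
    aPick l x cm pos r
      = (((cands l).map (fun p => (PySem.Int.bxor x p.1, p.2 + (pos - 1)))).foldl pstep (cm, r)).2 := by
  induction l with
  | nil => intro x cm pos r; simp [aPick, cands]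
  | cons v t ih =>
    intro x cm pos r
    have hmap : (cands t).map ((fun p => (PySem.Int.bxor x p.1, p.2 + (pos - 1))) ∘
        (fun p : Int × Int => (PySem.Int.bxor v p.1, p.2 + 1)))
        = (cands t).map (fun p => (PySem.Int.bxor (PySem.Int.bxor x v) p.1, p.2 + (pos + 1 - 1))) := by
      apply List.map_congr_left
      intro p _
      simp [Function.comp, pv_bxor_assoc]
    simp only [aPick, cands, List.map_cons, List.foldl_cons, List.map_map]
    rw [hmap]
    have harith : (1 : Int) + (pos - 1) = pos := by ring
    rw [harith]
    by_cases h : PySem.Int.bxor x v > cm <;>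
      simp [pstep, h, ih]

theorem pick_cands (l : List Int) : pick (cands l) = aPick l 0 0 1 1 := by
  rw [aPick_eq_fold]
  have : (cands l).map (fun p => (PySem.Int.bxor 0 p.1, p.2 + (1 - 1))) = (cands l).map id := by
    apply List.map_congr_left
    intro p _
    rw [PySem.Int.bxor_comm, PySem.Int.bxor_zero]
    simp
  rw [this, List.map_id, pick]

theorem suffPick_length (l : List Int) : (suffPick l).length = l.length := by
  induction l with
  | nil => rfl
  | cons v t ih => simp [suffPick, ih]

theorem suffPick_getElem? (l : List Int) : ∀ (k : Nat), k < l.length →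
    (suffPick l)[k]? = some (aPick (l.drop k) 0 0 1 1) := by
  induction l with
  | nil => intro k hk; simp at hk
  | cons v t ih =>
    intro k hk
    cases k with
    | zero => simp [suffPick]
    | succ m =>
      simp only [suffPick, List.getElem?_cons_succ, List.drop_succ_cons]
      exact ih m (by simpa using hk)

-- A's inner loop over range(j, n) equals one res-update with aPick over the suffix
theorem inner_eq (nums : List Int) (i : Int) (hi : 0 ≤ i) :
    ∀ (l : List Int) (j : Int) (x cm cl r : Int) (res : List Int),
      i ≤ j → nums.drop j.toNat = l → j.toNat + l.length = nums.length →
      res.set i.toNat r = res →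
      ((PySem.List.pyRange j (nums.length : Int) 1).foldl
        (fun (s : Int × Int × Int × List Int) jj =>
          let xor_ := PySem.Int.bxor s.1 (PySem.List.pyGetD nums jj 0)
          if xor_ > s.2.1 then
            (xor_, xor_, jj - i + 1, s.2.2.2.set i.toNat (jj - i + 1))
          else
            (xor_, s.2.1, s.2.2.1, s.2.2.2))
        (x, cm, cl, res)).2.2.2
      = res.set i.toNat (aPick l x cm (j - i + 1) r) := by
  intro l
  induction l with
  | nil =>
    intro j x cm cl r res hij hdrop hlen hres
    have hj : j = (nums.length : Int) := by
      simp at hlen; omega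
    rw [hj, PySem.List.pyRange_one_eq_nil (le_refl _)]
    simpa [aPick] using hres.symm
  | cons v t ih =>
    intro j x cm cl r res hij hdrop hlen hres
    have hj0 : 0 ≤ j := le_trans hi hij
    have hjn : j < (nums.length : Int) := by
      simp at hlen; omega
    rw [PySem.List.pyRange_one_cons hjn, List.foldl_cons]
    have hget : PySem.List.pyGetD nums j 0 = v := by
      rw [PySem.List.pyGetD_of_nonneg nums 0 hj0]
      have : nums[j.toNat]? = some v := by
        have h := @List.getElem?_drop _ nums j.toNat 0
        rw [hdrop] at h
        simpa using h.symm
      simp [List.getD, this]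
    have hdrop' : nums.drop (j + 1).toNat = t := by
      have : (j + 1).toNat = j.toNat + 1 := by omega
      rw [this, List.drop_add_one_eq_tail_drop, hdrop]
      rfl
    have hlen' : (j + 1).toNat + t.length = nums.length := by
      simp at hlen ⊢; omega
    simp only [hget]
    by_cases h : PySem.Int.bxor x v > cm
    · simp only [h, if_pos]
      rw [ih (j + 1) _ _ _ (j - i + 1) _ (by omega) hdrop' hlen' (List.set_set _)]
      rw [List.set_set]
      have : j + 1 - i + 1 = (j - i + 1) + 1 := by ring
      rw [this]
      simp [aPick, h]
    · simp only [h, if_false]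
      rw [ih (j + 1) _ _ _ r _ (by omega) hdrop' hlen' hres]
      have : j + 1 - i + 1 = (j - i + 1) + 1 := by ring
      rw [this]
      simp [aPick, h]

-- outer loop of A: fills positions left to right with the suffPick values
theorem outer_eq (nums : List Int) :
    ∀ (d k : Nat), k + d = nums.length →
      ((PySem.List.pyRange (k : Int) (nums.length : Int) 1).foldl
        (fun res i =>
          ((PySem.List.pyRange i (nums.length : Int) 1).foldl
            (fun (s : Int × Int × Int × List Int) j =>
              let xor_ := PySem.Int.bxor s.1 (PySem.List.pyGetD nums j 0)
              if xor_ > s.2.1 then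
                (xor_, xor_, j - i + 1, s.2.2.2.set i.toNat (j - i + 1))
              else
                (xor_, s.2.1, s.2.2.1, s.2.2.2))
            (0, 0, 0, res)).2.2.2)
        ((suffPick nums).take k ++ List.replicate d 1)) = suffPick nums := by
  intro d
  induction d with
  | zero =>
    intro k hk
    rw [PySem.List.pyRange_one_eq_nil (by omega)]
    simp only [List.foldl_nil, List.replicate, List.append_nil]
    rw [List.take_of_length_le (by rw [suffPick_length]; omega)]
  | succ m ih =>
    intro k hk
    have hkn : (k : Int) < (nums.length : Int) := by omega
    rw [PySem.List.pyRange_one_cons hkn, List.foldl_cons]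
    have hklen : ((suffPick nums).take k).length = k := by
      rw [List.length_take, suffPick_length]; omega
    have hres1 : ((suffPick nums).take k ++ List.replicate (m + 1) 1).set (k : Int).toNat (1 : Int)
        = (suffPick nums).take k ++ List.replicate (m + 1) 1 := by
      have : List.replicate (m + 1) (1 : Int) = 1 :: List.replicate m 1 := rfl
      rw [this]
      have hk' : (k : Int).toNat = ((suffPick nums).take k).length := by simp [hklen]
      rw [hk']
      simp
    rw [inner_eq nums (k : Int) (by omega) (nums.drop k) (k : Int) 0 0 0 1 _ (le_refl _)
        (by simp) (by simp [List.length_drop]; omega) hres1]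
    have hstep : ((suffPick nums).take k ++ List.replicate (m + 1) 1).set (k : Int).toNat
          (aPick (nums.drop k) 0 0 ((k:Int) - (k:Int) + 1) 1)
        = (suffPick nums).take (k + 1) ++ List.replicate m 1 := by
      have h1 : ((k:Int) - (k:Int) + 1) = 1 := by ring
      have h2 : List.replicate (m + 1) (1 : Int) = 1 :: List.replicate m 1 := rfl
      have hk' : (k : Int).toNat = ((suffPick nums).take k).length := by simp [hklen]
      rw [h1, h2, hk']
      simp only [List.set_append_right _ _ (le_refl _)]
      have htake : (suffPick nums).take (k + 1)
          = (suffPick nums).take k ++ [aPick (nums.drop k) 0 0 1 1] := by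
        rw [List.take_add_one, suffPick_getElem? nums k (by omega)]
        rfl
      rw [htake]
      simp
    rw [hstep]
    have : ((k : Int) + 1) = ((k + 1 : Nat) : Int) := by push_cast; ring
    rw [this]
    exact ih (k + 1) (by omega)

theorem a_eq_suffPick (nums : List Int) : smallestSubarrays2 nums = suffPick nums := by
  rw [smallestSubarrays2]
  have h0 : List.replicate nums.length (1 : Int)
      = (suffPick nums).take 0 ++ List.replicate nums.length 1 := by simp
  rw [h0]
  have := outer_eq nums nums.length 0 (by omega)
  simpa using this

-- ---------- first-max characterisation of the fold A performs ----------

theorem pvPK : ∀ (C : List (Int × Int)) (b : Int × Int), C.Pairwise (fun x y => x.2 < y.2) →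
    (C.foldl pstep b = b ∧ ∀ c ∈ C, c.1 ≤ b.1) ∨
    (C.foldl pstep b ∈ C ∧ b.1 < (C.foldl pstep b).1 ∧ (∀ c ∈ C, c.1 ≤ (C.foldl pstep b).1) ∧
      (∀ c ∈ C, c.1 = (C.foldl pstep b).1 → (C.foldl pstep b).2 ≤ c.2)) := by
  intro C
  induction C with
  | nil => intro b _; left; exact ⟨rfl, by simp⟩
  | cons c t ih =>
    intro b hpw
    obtain ⟨hpc, hpt⟩ := List.pairwise_cons.mp hpw
    rw [List.foldl_cons]
    by_cases hcb : c.1 > b.1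
    · have hps : pstep b c = c := by simp [pstep, hcb]
      rw [hps]
      rcases ih c hpt with ⟨heq, hall⟩ | ⟨hmem, hlt, hbd, hties⟩
      · right
        rw [heq]
        refine ⟨List.mem_cons_self, hcb, ?_, ?_⟩
        · intro d hd
          rcases List.mem_cons.mp hd with rfl | hd
          · exact le_refl _
          · exact hall d hd
        · intro d hd hde
          rcases List.mem_cons.mp hd with rfl | hd
          · exact le_refl _
          · exact le_of_lt (hpc d hd)
      · right
        refine ⟨List.mem_cons_of_mem _ hmem, lt_trans hcb hlt, ?_, ?_⟩
        · intro d hd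
          rcases List.mem_cons.mp hd with rfl | hd
          · exact le_of_lt hlt
          · exact hbd d hd
        · intro d hd hde
          rcases List.mem_cons.mp hd with rfl | hd
          · omega
          · exact hties d hd hde
    · have hps : pstep b c = b := by simp [pstep, hcb]
      rw [hps]
      rcases ih b hpt with ⟨heq, hall⟩ | ⟨hmem, hlt, hbd, hties⟩
      · left
        refine ⟨heq, ?_⟩
        intro d hd
        rcases List.mem_cons.mp hd with rfl | hd
        · omega
        · exact hall d hd
      · right
        refine ⟨List.mem_cons_of_mem _ hmem, hlt, ?_, ?_⟩
        · intro d hd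
          rcases List.mem_cons.mp hd with rfl | hd
          · omega
          · exact hbd d hd
        · intro d hd hde
          rcases List.mem_cons.mp hd with rfl | hd
          · omega
          · exact hties d hd hde

-- ---------- prefix xors ----------

def pvW (l : List Int) (t : Nat) : Int := (l.take t).foldl PySem.Int.bxor 0

theorem pvW_hoist : ∀ (w : List Int) (a c : Int),
    w.foldl PySem.Int.bxor (PySem.Int.bxor c a) = PySem.Int.bxor c (w.foldl PySem.Int.bxor a) := by
  intro w
  induction w with
  | nil => intro a c; simp [List.foldl]
  | cons v t ih => intro a c; simp only [List.foldl_cons, ← pv_bxor_assoc, ih]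

theorem pvBxor_cancel (a b : Int) : PySem.Int.bxor a (PySem.Int.bxor a b) = b := by
  rw [pv_bxor_assoc, PySem.Int.bxor_self, PySem.Int.bxor_comm, PySem.Int.bxor_zero]

theorem pvW_cons (v : Int) (t : List Int) (s : Nat) :
    pvW (v :: t) (s+1) = PySem.Int.bxor v (pvW t s) := by
  unfold pvW
  rw [List.take_succ_cons, List.foldl_cons,
      show PySem.Int.bxor 0 v = PySem.Int.bxor v 0 from PySem.Int.bxor_comm 0 v, pvW_hoist]

theorem cands_eq (l : List Int) :
    cands l = (List.range l.length).map (fun t => (pvW l (t+1), ((t : Int) + 1))) := by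
  induction l with
  | nil => simp [cands]
  | cons v t ih =>
    simp only [cands, ih, List.length_cons, List.range_succ_eq_map, List.map_cons, List.map_map]
    congr 1
    · have h1 : pvW (v :: t) 1 = v := by
        rw [show (1:Nat) = 0+1 from rfl, pvW_cons]
        simp [pvW]
      simp [h1]
    · apply List.map_congr_left
      intro i _
      simp only [Function.comp]
      rw [Prod.mk.injEq]
      refine ⟨(pvW_cons v t (i+1)).symm, by push_cast; ring⟩

theorem pvW_suffix (nums : List Int) (i t : Nat) (_h : i + t ≤ nums.length) :
    pvW (nums.drop i) t = PySem.Int.bxor (pvW nums i) (pvW nums (i + t)) := by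
  have hsplit : nums.take (i+t) = nums.take i ++ (nums.drop i).take t := List.take_add ..
  have hkey : pvW nums (i+t) = PySem.Int.bxor (pvW nums i) (pvW (nums.drop i) t) := by
    unfold pvW
    rw [hsplit, List.foldl_append,
        show (nums.take i).foldl PySem.Int.bxor 0
          = PySem.Int.bxor ((nums.take i).foldl PySem.Int.bxor 0) 0
          from (PySem.Int.bxor_zero _).symm,
        pvW_hoist, PySem.Int.bxor_zero]
  rw [hkey, pvBxor_cancel]

theorem pvPfx_get : ∀ (l : List Int) (c : Int) (j : Nat), j ≤ l.length →
    (pvPfx c l)[j]? = some ((l.take j).foldl PySem.Int.bxor c) := by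
  intro l
  induction l with
  | nil =>
    intro c j hj
    simp at hj
    subst hj
    simp [pvPfx]
  | cons x t ih =>
    intro c j hj
    cases j with
    | zero => simp [pvPfx]
    | succ m =>
      simp only [pvPfx, List.getElem?_cons_succ, List.take_succ_cons, List.foldl_cons]
      exact ih (PySem.Int.bxor c x) m (by simpa using hj)

-- ---------- the trie built by B's sweep and its contents ----------

def pvSL (nums : List Int) : Nat → List (Nat × Int)
  | 0 => []
  | d+1 => (pvEnc (pvW nums (nums.length - d)), ((nums.length : Int) - (d : Int))) :: pvSL nums d

def pvTA (nums : List Int) : Nat → PvTrie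
  | 0 => .nil
  | d+1 => pvIns 34 (pvTA nums d) (pvEnc (pvW nums (nums.length - d))) ((nums.length : Int) - (d : Int))

theorem pvTA_repr (nums : List Int) : ∀ d, pvRepr 34 (pvTA nums d) (pvSL nums d) := by
  intro d
  induction d with
  | zero => exact pvRepr_nil 34
  | succ d ih =>
    have h := pvIns_spec 34 (pvTA nums d) (pvSL nums d)
      (pvEnc (pvW nums (nums.length - d))) ((nums.length : Int) - (d : Int)) ih
    rw [Nat.mod_eq_of_lt (pvEnc_lt _)] at h
    exact h

theorem pvSL_mem (nums : List Int) : ∀ (d : Nat), d ≤ nums.length → ∀ q,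
    (q ∈ pvSL nums d ↔ ∃ j : Nat, nums.length - d + 1 ≤ j ∧ j ≤ nums.length ∧
      q = (pvEnc (pvW nums j), (j : Int))) := by
  intro d
  induction d with
  | zero =>
    intro _ q
    simp only [pvSL, List.not_mem_nil, false_iff, not_exists]
    intro j h
    omega
  | succ d ih =>
    intro hd q
    rw [pvSL, List.mem_cons, ih (by omega) q]
    constructor
    · rintro (rfl | ⟨j, h1, h2, rfl⟩)
      · refine ⟨nums.length - d, by omega, by omega, ?_⟩
        rw [Prod.mk.injEq]
        exact ⟨rfl, by omega⟩
      · exact ⟨j, by omega, h2, rfl⟩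
    · rintro ⟨j, h1, h2, rfl⟩
      by_cases hj : j = nums.length - d
      · left
        subst hj
        rw [Prod.mk.injEq]
        exact ⟨rfl, by omega⟩
      · right
        exact ⟨j, by omega, h2, rfl⟩

-- ---------- per-start correspondence and B's loop ----------

theorem pvW_succ (nums : List Int) (j : Nat) (hj : j < nums.length) :
    pvW nums (j+1) = PySem.Int.bxor (pvW nums j) nums[j] := by
  unfold pvW
  rw [List.take_add_one, List.foldl_append]
  simp [List.getElem?_eq_getElem hj]

theorem pvPR (nums : List Int) (hD : ∀ x ∈ nums, pvR x) :
    ∀ j, j ≤ nums.length → pvR (pvW nums j) := by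
  intro j
  induction j with
  | zero =>
    intro _
    have h0 : pvW nums 0 = 0 := by simp [pvW]
    rw [h0]
    exact ⟨by norm_num, by norm_num⟩
  | succ j ih =>
    intro hj
    rw [pvW_succ nums j (by omega)]
    exact (pvBxorR _ _ (ih (by omega)) (hD _ (List.getElem_mem _))).1

theorem pvCore (nums : List Int) (i : Nat) (hi : i < nums.length)
    (hD : ∀ x ∈ nums, pvR x) :
    (if (if (pvQry 34 (pvTA nums (nums.length - i)) (pvEnc (pvW nums i)) 8589934592 0).1 >>> 33 != 0
        then ((pvQry 34 (pvTA nums (nums.length - i)) (pvEnc (pvW nums i)) 8589934592 0).1 : Int) - 17179869184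
        else ((pvQry 34 (pvTA nums (nums.length - i)) (pvEnc (pvW nums i)) 8589934592 0).1 : Int)) > 0
     then (pvQry 34 (pvTA nums (nums.length - i)) (pvEnc (pvW nums i)) 8589934592 0).2 - (i : Int)
     else 1) = aPick (nums.drop i) 0 0 1 1 := by
  have hd1 : 1 ≤ nums.length - i := by omega
  have hdn : nums.length - i ≤ nums.length := by omega
  have hSLne : pvSL nums (nums.length - i) ≠ [] := by
    obtain ⟨d', hd'⟩ : ∃ d', nums.length - i = d' + 1 := ⟨nums.length - i - 1, by omega⟩
    rw [hd']
    simp [pvSL]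
  obtain ⟨p, hp, heq, hdom, hmin⟩ := pvQry_spec 34 (pvTA nums (nums.length - i))
    (pvSL nums (nums.length - i)) (pvEnc (pvW nums i)) 8589934592 0
    (pvTA_repr nums _) hSLne
  obtain ⟨j, hj1, hj2, rfl⟩ := (pvSL_mem nums _ hdn p).mp hp
  have hij : i + 1 ≤ j := by omega
  have hRi : pvR (pvW nums i) := pvPR nums hD i (by omega)
  have hRj : pvR (pvW nums j) := pvPR nums hD j hj2
  have hbx := pvBxorR (pvW nums i) (pvW nums j) hRi hRj
  have hmxR : pvR (PySem.Int.bxor (pvW nums i) (pvW nums j)) := hbx.1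
  have humod : pvEnc (pvW nums i) % 2^34 = pvEnc (pvW nums i) := Nat.mod_eq_of_lt (pvEnc_lt _)
  have hsmod : (8589934592 : Nat) % 2^34 = 8589934592 := Nat.mod_eq_of_lt (by norm_num)
  rw [humod] at heq hdom
  rw [hsmod] at hdom
  set mx := PySem.Int.bxor (pvW nums i) (pvW nums j) with hmx
  have hq1 : (pvQry 34 (pvTA nums (nums.length - i)) (pvEnc (pvW nums i)) 8589934592 0).1
      = pvEnc mx := by
    rw [heq]
    simp [hbx.2]
  have hq2 : (pvQry 34 (pvTA nums (nums.length - i)) (pvEnc (pvW nums i)) 8589934592 0).2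
      = (j : Int) := by rw [heq]
  have hbest : (if (pvQry 34 (pvTA nums (nums.length - i)) (pvEnc (pvW nums i)) 8589934592 0).1 >>> 33 != 0
      then ((pvQry 34 (pvTA nums (nums.length - i)) (pvEnc (pvW nums i)) 8589934592 0).1 : Int) - 17179869184
      else ((pvQry 34 (pvTA nums (nums.length - i)) (pvEnc (pvW nums i)) 8589934592 0).1 : Int)) = mx := by
    rw [hq1]
    exact pvDec mx hmxR
  rw [hbest, hq2]
  -- window values and their facts
  have hmxW : pvW (nums.drop i) (j - i) = mx := by
    rw [pvW_suffix nums i (j - i) (by omega), show i + (j - i) = j from by omega]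
  have hWmem : ∀ t : Nat, t < nums.length - i →
      (pvEnc (pvW nums (i+t+1)), ((i+t+1 : Nat) : Int)) ∈ pvSL nums (nums.length - i) := by
    intro t ht
    exact (pvSL_mem nums _ hdn _).mpr ⟨i+t+1, by omega, by omega, rfl⟩
  have hWR : ∀ t : Nat, t < nums.length - i → pvR (pvW (nums.drop i) (t+1)) := by
    intro t ht
    rw [pvW_suffix nums i (t+1) (by omega)]
    exact (pvBxorR _ _ hRi (pvPR nums hD (i+(t+1)) (by omega))).1
  have hWenc : ∀ t : Nat, t < nums.length - i →
      pvEnc (pvW (nums.drop i) (t+1)) = pvEnc (pvW nums i) ^^^ pvEnc (pvW nums (i+t+1)) := by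
    intro t ht
    rw [pvW_suffix nums i (t+1) (by omega), show i + (t+1) = i+t+1 from by omega]
    exact (pvBxorR _ _ hRi (pvPR nums hD (i+t+1) (by omega))).2
  have hle : ∀ t : Nat, t < nums.length - i → pvW (nums.drop i) (t+1) ≤ mx := by
    intro t ht
    have h1 := hdom _ (hWmem t ht)
    rw [← hWenc t ht, ← hbx.2] at h1
    exact (pvSignLe _ _ (hWR t ht) hmxR).mp h1
  -- the A-side fold
  rw [← pick_cands, pick]
  have hpw : (cands (nums.drop i)).Pairwise (fun x y => x.2 < y.2) := by
    rw [cands_eq]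
    apply List.Pairwise.map
    · intro a b (hab : a < b)
      show ((a:Int)+1) < ((b:Int)+1)
      omega
    · exact List.pairwise_lt_range
  have hlen : (nums.drop i).length = nums.length - i := by simp
  have hmemC : ∀ t : Nat, t < nums.length - i →
      (pvW (nums.drop i) (t+1), ((t:Int)+1)) ∈ cands (nums.drop i) := by
    intro t ht
    rw [cands_eq]
    exact List.mem_map.mpr ⟨t, by rw [List.mem_range]; omega, rfl⟩
  have hmemC' : ∀ c ∈ cands (nums.drop i), ∃ t : Nat, t < nums.length - i ∧
      c = (pvW (nums.drop i) (t+1), ((t:Int)+1)) := by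
    intro c hc
    rw [cands_eq] at hc
    obtain ⟨t, ht, rfl⟩ := List.mem_map.mp hc
    exact ⟨t, by rw [List.mem_range] at ht; omega, rfl⟩
  have hallle : ∀ c ∈ cands (nums.drop i), c.1 ≤ mx := by
    intro c hc
    obtain ⟨t, ht, rfl⟩ := hmemC' c hc
    exact hle t ht
  by_cases hpos : mx > 0
  · rw [if_pos hpos]
    rcases pvPK (cands (nums.drop i)) (0, 1) hpw with ⟨hfe, hall⟩ | ⟨hmem, hlt, hbd, hties⟩
    · exfalso
      have hcmem := hmemC (j - i - 1) (by omega)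
      have := hall _ hcmem
      rw [show j - i - 1 + 1 = j - i from by omega, hmxW] at this
      omega
    · obtain ⟨tr, htr, hre⟩ := hmemC' _ hmem
      have hrval : (pvW (nums.drop i) (tr+1)) = mx := by
        have h1 : (pvW (nums.drop i) (tr+1)) ≤ mx := hle tr htr
        have hcmem := hmemC (j - i - 1) (by omega)
        have h2 := hbd _ hcmem
        rw [show j - i - 1 + 1 = j - i from by omega, hmxW] at h2
        rw [hre] at h2
        simp at h2
        omega
      have hto : ((cands (nums.drop i)).foldl pstep (0, 1)).2 ≤ (j : Int) - (i : Int) := by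
        have hcmem := hmemC (j - i - 1) (by omega)
        have := hties _ hcmem (by
          rw [show j - i - 1 + 1 = j - i from by omega, hmxW, hre]
          rw [hrval])
        rw [show ((j - i - 1 : Nat) : Int) + 1 = (j : Int) - (i : Int) from by omega] at this
        exact this
      have hfrom : (j : Int) - (i : Int) ≤ ((cands (nums.drop i)).foldl pstep (0, 1)).2 := by
        have hqr := hWmem tr htr
        have hq1e : (pvEnc (pvW nums (i+tr+1))) = pvEnc (pvW nums j) := by
          have he1 : pvEnc (pvW (nums.drop i) (tr+1)) = pvEnc mx := by rw [hrval]
          rw [hWenc tr htr, hbx.2] at he1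
          have h2 := congrArg (fun z => pvEnc (pvW nums i) ^^^ z) he1
          simpa [pvXorCancel] using h2
        have := hmin _ hqr hq1e
        simp at this
        rw [hre]
        simp
        omega
      omega
  · rw [if_neg hpos]
    rcases pvPK (cands (nums.drop i)) (0, 1) hpw with ⟨hfe, _⟩ | ⟨hmem, hlt, _, _⟩
    · rw [hfe]
    · exfalso
      have := hallle _ hmem
      simp at hlt
      omega

theorem pvGetP (nums : List Int) (m : Nat) (hm : m ≤ nums.length) :
    PySem.List.pyGetD (pvPfx 0 nums) (m : Int) 0 = pvW nums m := by
  rw [PySem.List.pyGetD_of_nonneg (pvPfx 0 nums) 0 (by omega : (0:Int) ≤ (m : Int))]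
  have h := pvPfx_get nums 0 m hm
  simp [List.getD, h, pvW]

theorem pvB_loop (nums : List Int) (hD : ∀ x ∈ nums, pvR x) :
    ∀ m, m ≤ nums.length →
    ((List.range m).reverse.foldl (pvBody (pvPfx 0 nums))
      (pvTA nums (nums.length - m), List.replicate m 1 ++ (suffPick nums).drop m))
    = (pvTA nums nums.length, suffPick nums) := by
  intro m
  induction m with
  | zero =>
    intro _
    simp
  | succ m ih =>
    intro hm
    rw [List.range_succ, List.reverse_append, List.reverse_singleton, List.singleton_append,
        List.foldl_cons]
    have hg1 : PySem.List.pyGetD (pvPfx 0 nums) ((m : Int) + 1) 0 = pvW nums (m+1) := by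
      rw [show ((m : Int) + 1) = (((m+1 : Nat)) : Int) from by push_cast; ring]
      exact pvGetP nums (m+1) (by omega)
    have hg0 : PySem.List.pyGetD (pvPfx 0 nums) (m : Int) 0 = pvW nums m :=
      pvGetP nums m (by omega)
    have hroot : pvIns 34 (pvTA nums (nums.length - (m+1))) (pvEnc (pvW nums (m+1))) ((m : Int) + 1)
        = pvTA nums (nums.length - m) := by
      have e1 : nums.length - m = (nums.length - (m+1)) + 1 := by omega
      rw [e1]
      simp only [pvTA]
      rw [show nums.length - (nums.length - (m+1)) = m + 1 from by omega,
          show (nums.length : Int) - ((nums.length - (m+1) : Nat) : Int) = (m : Int) + 1 from by omega]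
    have hsuffm : (suffPick nums).drop m = aPick (nums.drop m) 0 0 1 1 :: (suffPick nums).drop (m+1) := by
      rw [List.drop_eq_getElem_cons (by rw [suffPick_length]; omega)]
      congr 1
      have h1 := suffPick_getElem? nums m (by omega)
      rw [List.getElem?_eq_getElem (by rw [suffPick_length]; omega)] at h1
      exact Option.some.inj h1
    have hrepl : List.replicate (m+1) (1:Int) ++ (suffPick nums).drop (m+1)
        = List.replicate m 1 ++ 1 :: (suffPick nums).drop (m+1) := by
      rw [List.replicate_succ', List.append_assoc, List.singleton_append]
    have hset : ∀ v : Int, (List.replicate m (1:Int) ++ 1 :: (suffPick nums).drop (m+1)).set m v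
        = List.replicate m 1 ++ v :: (suffPick nums).drop (m+1) := by
      intro v
      rw [List.set_append]
      simp
    have hstep :
        pvBody (pvPfx 0 nums)
          (pvTA nums (nums.length - (m+1)), List.replicate (m+1) 1 ++ (suffPick nums).drop (m+1)) m
        = (pvTA nums (nums.length - m), List.replicate m 1 ++ (suffPick nums).drop m) := by
      unfold pvBody
      dsimp only
      rw [hg1, hg0, hroot, hrepl]
      have hcore := pvCore nums m (by omega) hD
      rw [Prod.mk.injEq]
      refine ⟨rfl, ?_⟩
      rw [hsuffm, ← hcore]
      by_cases hb : (if (pvQry 34 (pvTA nums (nums.length - m)) (pvEnc (pvW nums m)) 8589934592 0).1 >>> 33 != 0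
          then ((pvQry 34 (pvTA nums (nums.length - m)) (pvEnc (pvW nums m)) 8589934592 0).1 : Int) - 17179869184
          else ((pvQry 34 (pvTA nums (nums.length - m)) (pvEnc (pvW nums m)) 8589934592 0).1 : Int)) > 0
      · rw [if_pos hb, if_pos hb, hset]
      · rw [if_neg hb, if_neg hb]
    rw [hstep]
    exact ih (by omega)

theorem b_eq_suffPick (nums : List Int) (hD : ∀ x ∈ nums, pvR x) :
    smallestSubarrays2_alt nums = suffPick nums := by
  unfold smallestSubarrays2_alt
  have hinv := pvB_loop nums hD nums.length (le_refl _)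
  rw [show nums.length - nums.length = 0 from by omega] at hinv
  rw [List.drop_of_length_le (by rw [suffPick_length])] at hinv
  rw [List.append_nil] at hinv
  rw [show (PvTrie.nil : PvTrie) = pvTA nums 0 from rfl, hinv]

-- ===== VERDICT (by name: the statement is the Claim_ definition above) =====
theorem smallestSubarrays2_spec : Claim_equal_smallestSubarrays2 := by
  intro nums hdom
  unfold Spec_smallestSubarrays2
  have hD : ∀ x ∈ nums, pvR x := by
    intro x hx
    unfold Dom_smallestSubarrays2 at hdom
    rw [List.all_eq_true] at hdom
    have := hdom x hx
    simp [pvDomInt] at this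
    unfold pvR
    omega
  rw [a_eq_suffPick, b_eq_suffPick nums hD]
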